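-- pv_equiv track=rewrite | github.com/TanbirulM/SI206-Final-Proj | extra_api_output.py | food_recall_classifications
-- ===== SOURCE A (Python) =====
-- def food_recall_classifications(recall_lst):
--     class_1_count = 0
--     class_2_count = 0
--     class_3_count = 0
--
--     classification_lst = []
--
--     for i in recall_lst:
--         if i[2] == 'Class I':
--             class_1_count += 1
--         elif i[2] == 'Class II':
--             class_2_count += 1
--         else:
--             class_3_count += 1
--
--     classification_lst.append((class_1_count, class_2_count, class_3_count))
--     return classification_lst
-- ===== SOURCE B (Python) =====
-- def food_recall_classifications(recall_lst):
--     c1 = sum(1 for i in recall_lst if i[2] == 'Class I')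
--     c2 = sum(1 for i in recall_lst if i[2] == 'Class II')
--     return [(c1, c2, len(recall_lst) - c1 - c2)]
-- ===== Notes on version B (the rewrite author's own statement) =====
-- stated objective: simpler
-- what changed: Replaces the three-way-branch counter loop with two filtered counts and derives the catch-all third count as len - c1 - c2.
import Mathlib
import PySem

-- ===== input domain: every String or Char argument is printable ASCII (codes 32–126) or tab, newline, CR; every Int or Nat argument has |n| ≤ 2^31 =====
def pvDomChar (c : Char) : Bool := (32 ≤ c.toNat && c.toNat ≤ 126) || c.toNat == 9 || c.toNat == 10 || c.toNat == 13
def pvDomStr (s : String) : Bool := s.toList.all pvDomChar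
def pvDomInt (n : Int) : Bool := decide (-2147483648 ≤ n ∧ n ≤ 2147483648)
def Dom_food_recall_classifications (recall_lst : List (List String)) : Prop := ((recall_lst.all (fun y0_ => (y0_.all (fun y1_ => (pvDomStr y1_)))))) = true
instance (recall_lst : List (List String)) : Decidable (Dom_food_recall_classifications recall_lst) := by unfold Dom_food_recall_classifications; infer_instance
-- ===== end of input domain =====

-- B replaces A's three-way-branch counter loop with two filtered counts, deriving the third by subtraction (simpler decomposition, same O(n) cost).

-- ===== PORT A =====
-- A's loop: three counters, i[2] compared against 'Class I' then 'Class II', else the third counter.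
-- i[2] is PySem.List.pyGet?; Pre_ guarantees it is some, so .getD "" is exact on Pre_.
def food_recall_classifications (recall_lst : List (List String)) : List (Int × Int × Int) :=
  let cs := recall_lst.foldl (fun (acc : Int × Int × Int) i =>
    let v := (PySem.List.pyGet? i 2).getD ""
    if v = "Class I" then (acc.1 + 1, acc.2.1, acc.2.2)
    else if v = "Class II" then (acc.1, acc.2.1 + 1, acc.2.2)
    else (acc.1, acc.2.1, acc.2.2 + 1)) (0, 0, 0)
  [cs]

-- ===== PORT B =====
def food_recall_classifications_alt (recall_lst : List (List String)) : List (Int × Int × Int) :=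
  let c1 : Int := recall_lst.countP (fun i => (PySem.List.pyGet? i 2).getD "" == "Class I")
  let c2 : Int := recall_lst.countP (fun i => (PySem.List.pyGet? i 2).getD "" == "Class II")
  [(c1, c2, (recall_lst.length : Int) - c1 - c2)]

-- ===== PRECONDITION & SPEC =====
-- Pre_ excludes exactly the inputs where A raises IndexError: a row with fewer than 3 fields.
def Pre_food_recall_classifications (recall_lst : List (List String)) : Prop :=
  ∀ i ∈ recall_lst, 3 ≤ i.length
instance (recall_lst : List (List String)) : Decidable (Pre_food_recall_classifications recall_lst) := by unfold Pre_food_recall_classifications; infer_instance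
def pvWitness_food_recall_classifications : List (List String) :=
  [["a", "b", "Class I"], ["c", "d", "Class III"]]

def Spec_food_recall_classifications (recall_lst : List (List String)) (out : List (Int × Int × Int)) : Prop := out = food_recall_classifications_alt recall_lst
instance (recall_lst : List (List String)) (out : List (Int × Int × Int)) : Decidable (Spec_food_recall_classifications recall_lst out) := by unfold Spec_food_recall_classifications; infer_instance

-- ===== CLAIM (what is proved, stated in full; the proofs are below) =====
def Claim_equal_food_recall_classifications : Prop := ∀ (recall_lst : List (List String)), Dom_food_recall_classifications recall_lst → Pre_food_recall_classifications recall_lst → Spec_food_recall_classifications recall_lst (food_recall_classifications recall_lst)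

-- ===== LEMMAS AND PROOFS =====
theorem frc_loop (recall_lst : List (List String)) : ∀ (a b c : Int),
    recall_lst.foldl (fun (acc : Int × Int × Int) i =>
      let v := (PySem.List.pyGet? i 2).getD ""
      if v = "Class I" then (acc.1 + 1, acc.2.1, acc.2.2)
      else if v = "Class II" then (acc.1, acc.2.1 + 1, acc.2.2)
      else (acc.1, acc.2.1, acc.2.2 + 1)) (a, b, c)
    = (a + recall_lst.countP (fun i => (PySem.List.pyGet? i 2).getD "" == "Class I"),
       b + recall_lst.countP (fun i => (PySem.List.pyGet? i 2).getD "" == "Class II"),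
       c + ((recall_lst.length : Int)
            - recall_lst.countP (fun i => (PySem.List.pyGet? i 2).getD "" == "Class I")
            - recall_lst.countP (fun i => (PySem.List.pyGet? i 2).getD "" == "Class II"))) := by
  induction recall_lst with
  | nil => intro a b c; simp
  | cons hd tl ih =>
    intro a b c
    simp only [List.foldl_cons, List.countP_cons, List.length_cons]
    by_cases h1 : (PySem.List.pyGet? hd 2).getD "" = "Class I"
    · simp only [h1, ih]
      simp
      omega
    · by_cases h2 : (PySem.List.pyGet? hd 2).getD "" = "Class II"
      · simp only [if_neg h1, h2, ih]
        simp [h1]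
        omega
      · simp only [if_neg h1, if_neg h2, ih]
        simp [h1, h2]
        omega

-- ===== VERDICT (by name: the statement is the Claim_ definition above) =====
theorem food_recall_classifications_spec : Claim_equal_food_recall_classifications := by
  intro recall_lst _ _
  show food_recall_classifications recall_lst = food_recall_classifications_alt recall_lst
  simp only [food_recall_classifications, food_recall_classifications_alt, frc_loop]
  norm_num
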